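-- pv_equiv track=rewrite | github.com/Giannasfrisi/Introduction-to-Python | ps4pr3.py | count_evens_rec
-- ===== SOURCE A (Python) =====
-- def count_evens_rec(binvals):
--     """Takes a string and returns the amount
--     of even numbers using recursion"""
--
--     if binvals == []:
--         return 0
--     else:
--         rest = count_evens_rec(binvals[1:])
--         first_string = binvals[0]
--         if first_string[-1] == '0':
--             return 1 + rest
--         else:
--             return rest
-- ===== SOURCE B (Python) =====
-- def count_evens_rec(binvals):
--     """Takes a list of binary strings and returns the amount
--     of even numbers, using an iterative loop with a counter."""
--     count = 0
--     for x in binvals: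
--         if x[-1] == '0':
--             count += 1
--     return count
-- ===== Notes on version B (the rewrite author's own statement) =====
-- stated objective: faster
-- what changed: Replaced the O(n^2) recursion (each call copies binvals[1:]) with a single front-to-back for-loop maintaining a counter.
import Mathlib
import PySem

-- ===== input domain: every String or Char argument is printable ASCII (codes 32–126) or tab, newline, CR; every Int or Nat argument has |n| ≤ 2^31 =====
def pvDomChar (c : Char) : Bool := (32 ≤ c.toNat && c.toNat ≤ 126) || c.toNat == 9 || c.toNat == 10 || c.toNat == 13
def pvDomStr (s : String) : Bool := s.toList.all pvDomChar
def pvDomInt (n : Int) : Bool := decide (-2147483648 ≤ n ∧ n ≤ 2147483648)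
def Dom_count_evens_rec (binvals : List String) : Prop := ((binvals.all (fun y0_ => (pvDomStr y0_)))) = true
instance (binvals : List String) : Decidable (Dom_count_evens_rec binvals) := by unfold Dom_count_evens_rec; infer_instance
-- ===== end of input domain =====

-- B replaces A's slice-per-call recursion by a single iterative pass with a counter (simpler).


-- ===== PORT A =====
-- literal port of A: recursion on the list; first_string[-1] is PySem.Str.pyGet? s (-1)
-- (none = IndexError; those inputs are excluded by Pre_)
def count_evens_rec : List String → Int
  | [] => 0
  | first_string :: tl =>
      let rest := count_evens_rec tl
      if PySem.Str.pyGet? first_string (-1) = some '0' then 1 + rest else rest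

-- ===== PORT B =====
-- literal port of B: a fold over the list carrying the counter
def count_evens_rec_alt (binvals : List String) : Int :=
  binvals.foldl (fun count x =>
    if PySem.Str.pyGet? x (-1) = some '0' then count + 1 else count) 0

-- ===== PRECONDITION & SPEC =====
-- Pre_ excludes lists containing an empty string: there both A and B raise IndexError on x[-1].
def Pre_count_evens_rec (binvals : List String) : Prop := ∀ s ∈ binvals, s ≠ ""
instance (binvals : List String) : Decidable (Pre_count_evens_rec binvals) := by
  unfold Pre_count_evens_rec; infer_instance

def pvWitness_count_evens_rec : List String := ["10", "11", "0"]

def Spec_count_evens_rec (binvals : List String) (out : Int) : Prop := out = count_evens_rec_alt binvals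
instance (binvals : List String) (out : Int) : Decidable (Spec_count_evens_rec binvals out) := by unfold Spec_count_evens_rec; infer_instance

-- ===== CLAIM =====
def Claim_equal_count_evens_rec : Prop := ∀ (binvals : List String), Dom_count_evens_rec binvals → Pre_count_evens_rec binvals → Spec_count_evens_rec binvals (count_evens_rec binvals)

-- ===== LEMMAS AND PROOFS =====
theorem count_evens_foldl (binvals : List String) (c : Int) :
    binvals.foldl (fun count x =>
      if PySem.Str.pyGet? x (-1) = some '0' then count + 1 else count) c
      = c + count_evens_rec binvals := by
  induction binvals generalizing c with
  | nil => simp [count_evens_rec]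
  | cons hd tl ih =>
      simp only [List.foldl_cons, count_evens_rec, ih]
      split_ifs <;> ring

-- ===== VERDICT =====
theorem count_evens_rec_spec : Claim_equal_count_evens_rec := by
  intro binvals _ _
  unfold Spec_count_evens_rec count_evens_rec_alt
  rw [count_evens_foldl]
  ring
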